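-- pv_equiv track=rewrite | github.com/sanand0/scripts | transcribe_calls.py | strip_prompt_metadata
-- ===== SOURCE A (Python) =====
-- def strip_prompt_metadata(frontmatter_body: str) -> str:
--     """Remove any existing prompt metadata from YAML frontmatter text."""
--     cleaned_lines: list[str] = []
--     skipping_prompt = False
--     for line in frontmatter_body.splitlines():
--         if skipping_prompt:
--             if line.startswith((" ", "\t")):
--                 continue
--             skipping_prompt = False
--         if line.startswith("prompt:"):
--             skipping_prompt = True
--             continue
--         cleaned_lines.append(line)
--     return "\n".join(cleaned_lines).strip()
-- ===== SOURCE B (Python) =====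
-- def strip_prompt_metadata(frontmatter_body: str) -> str:
--     """Remove any existing prompt metadata from YAML frontmatter text."""
--     lines = frontmatter_body.splitlines()
--     kept: list[str] = []
--     i, n = 0, len(lines)
--     while i < n:
--         line = lines[i]
--         if line.startswith("prompt:"):
--             i += 1
--             while i < n and lines[i].startswith((" ", "\t")):
--                 i += 1
--         else:
--             kept.append(line)
--             i += 1
--     return "\n".join(kept).strip()
-- ===== Notes on version B (the rewrite author's own statement) =====
-- stated objective: alternative
-- what changed: Replaces the boolean skipping_prompt flag threaded across loop iterations with an explicit index walk that consumes each prompt block's indented continuation lines in a nested inner loop.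
import Mathlib
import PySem

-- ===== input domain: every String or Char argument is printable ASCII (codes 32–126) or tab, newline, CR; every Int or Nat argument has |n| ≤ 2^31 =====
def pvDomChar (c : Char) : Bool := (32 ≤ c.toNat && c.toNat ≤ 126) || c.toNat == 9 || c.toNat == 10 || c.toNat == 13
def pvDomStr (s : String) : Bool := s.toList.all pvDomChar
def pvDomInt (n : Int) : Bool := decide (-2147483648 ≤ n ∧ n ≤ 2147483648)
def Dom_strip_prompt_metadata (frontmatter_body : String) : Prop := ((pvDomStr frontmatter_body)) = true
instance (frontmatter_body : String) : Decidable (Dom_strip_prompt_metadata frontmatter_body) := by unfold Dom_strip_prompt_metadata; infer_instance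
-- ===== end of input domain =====

-- B replaces A's skipping_prompt boolean carried across iterations with an explicit
-- index walk whose nested inner loop consumes each prompt block (objective: alternative).

-- ===== PORT A =====
-- line.startswith((" ", "\t"))
def pvIndented (line : String) : Bool :=
  PySem.Str.startswith line " " || PySem.Str.startswith line "\t"

-- one iteration of A's for-loop over the state (cleaned_lines, skipping_prompt)
def pvStepA (st : List String × Bool) (line : String) : List String × Bool :=
  if st.2 && pvIndented line then (st.1, true)
  else if PySem.Str.startswith line "prompt:" then (st.1, true)
  else (st.1 ++ [line], false)

def strip_prompt_metadata (frontmatter_body : String) : String :=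
  let res := (PySem.Str.splitlines frontmatter_body).foldl pvStepA ([], false)
  PySem.Str.strip (PySem.Str.join "\n" res.1)

-- ===== PORT B =====
-- the inner 'while i < n and lines[i].startswith((" ", "\t")): i += 1' loop
def pvConsume : List String → List String
  | [] => []
  | l :: rest => if pvIndented l then pvConsume rest else l :: rest

theorem pvConsume_length_le (xs : List String) : (pvConsume xs).length ≤ xs.length := by
  induction xs with
  | nil => simp [pvConsume]
  | cons l rest ih =>
    simp only [pvConsume]
    split
    · exact Nat.le_succ_of_le ih
    · simp

-- the outer 'while i < n' loop over the remaining lines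
def pvKeep : List String → List String
  | [] => []
  | l :: rest =>
    if PySem.Str.startswith l "prompt:" then pvKeep (pvConsume rest)
    else l :: pvKeep rest
termination_by xs => xs.length
decreasing_by
  · exact Nat.lt_succ_of_le (pvConsume_length_le rest)
  · simp

def strip_prompt_metadata_alt (frontmatter_body : String) : String :=
  PySem.Str.strip (PySem.Str.join "\n" (pvKeep (PySem.Str.splitlines frontmatter_body)))

-- ===== PRECONDITION & SPEC =====
def Spec_strip_prompt_metadata (frontmatter_body : String) (out : String) : Prop := out = strip_prompt_metadata_alt frontmatter_body
instance (frontmatter_body : String) (out : String) : Decidable (Spec_strip_prompt_metadata frontmatter_body out) := by unfold Spec_strip_prompt_metadata; infer_instance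

-- ===== CLAIM (what is proved, stated in full; the proofs are below) =====
def Claim_equal_strip_prompt_metadata : Prop := ∀ (frontmatter_body : String), Dom_strip_prompt_metadata frontmatter_body → Spec_strip_prompt_metadata frontmatter_body (strip_prompt_metadata frontmatter_body)

-- ===== LEMMAS AND PROOFS =====
-- A's fold with flag false computes pvKeep; with flag true it first consumes the indented block.
theorem pvFold_spec (xs : List String) : ∀ acc : List String,
    (xs.foldl pvStepA (acc, false)).1 = acc ++ pvKeep xs ∧
    (xs.foldl pvStepA (acc, true)).1 = acc ++ pvKeep (pvConsume xs) := by
  induction xs with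
  | nil => intro acc; simp [pvKeep, pvConsume]
  | cons l rest ih =>
    intro acc
    by_cases hind : pvIndented l = true <;>
      by_cases hp : PySem.Chars.startswith l.toList ['p', 'r', 'o', 'm', 'p', 't', ':'] = true <;>
      refine ⟨?_, ?_⟩ <;> simp [pvStepA, hind, hp, pvConsume, pvKeep, ih]

-- ===== VERDICT (by name: the statement is the Claim_ definition above) =====
theorem strip_prompt_metadata_spec : Claim_equal_strip_prompt_metadata := by
  intro f _
  unfold Spec_strip_prompt_metadata strip_prompt_metadata strip_prompt_metadata_alt
  have := (pvFold_spec (PySem.Str.splitlines f) []).1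
  simp only [List.nil_append] at this
  simp [this]
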